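-- pv_equiv track=rewrite | github.com/redraze/My_LeetCode_Solutions | 2264. Largest 3-Same-Digit Number in String.py | largestGoodInteger
-- ===== SOURCE A (Python) =====
-- def largestGoodInteger(num: str) -> str:
--     ret = cur = ""
--
--     for digit in num:
--         if not cur:
--             cur += digit
--             continue
--
--         if cur[-1] == digit:
--             cur += digit
--         else:
--             cur = digit
--             continue
--
--         if len(cur) == 3:
--             if cur > ret:
--                 ret, cur = cur, ""
--             else:
--                 cur = ""
--
--     return ret
-- ===== SOURCE B (Python) =====
-- def largestGoodInteger(num: str) -> str:
--     best = ""
--     for a, b, c in zip(num, num[1:], num[2:]):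
--         if a == b == c and a * 3 > best:
--             best = a * 3
--     return best
-- ===== Notes on version B (the rewrite author's own statement) =====
-- stated objective: simpler
-- what changed: Replaces A's run-accumulation state machine (growing/resetting a current-run string with a length-3 check) by a single sliding-window pass over zip(num, num[1:], num[2:]) that keeps only the running maximum triple.
import Mathlib
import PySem

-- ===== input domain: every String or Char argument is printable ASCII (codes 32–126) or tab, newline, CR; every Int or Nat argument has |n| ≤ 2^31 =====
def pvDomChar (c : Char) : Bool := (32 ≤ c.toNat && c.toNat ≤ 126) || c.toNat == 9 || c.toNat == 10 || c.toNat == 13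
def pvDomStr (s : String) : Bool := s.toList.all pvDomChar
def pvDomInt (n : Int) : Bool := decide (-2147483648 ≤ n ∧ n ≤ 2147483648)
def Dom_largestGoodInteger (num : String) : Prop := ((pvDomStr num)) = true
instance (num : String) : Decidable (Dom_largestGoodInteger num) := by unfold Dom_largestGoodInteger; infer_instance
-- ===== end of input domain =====

-- B replaces A's run-accumulation state machine by a sliding-window pass keeping only the running maximum triple (objective: simpler).

-- ===== PORT A =====
-- loop body of A: state (ret, cur), both strings kept as List Char
def stepA_largestGoodInteger (s : List Char × List Char) (digit : Char) : List Char × List Char :=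
  let ret := s.1
  let cur := s.2
  if cur = [] then (ret, cur ++ [digit])                    -- if not cur: cur += digit; continue
  else if PySem.List.pyGet? cur (-1) = some digit then      -- if cur[-1] == digit:
    let cur' := cur ++ [digit]                              --   cur += digit
    if cur'.length = 3 then                                 -- if len(cur) == 3:
      (if ret < cur' then (cur', []) else (ret, []))        --   if cur > ret: ret, cur = cur, "" else cur = ""
    else (ret, cur')
  else (ret, [digit])                                       -- else: cur = digit; continue

def largestGoodInteger (num : String) : String :=
  String.ofList (num.toList.foldl stepA_largestGoodInteger ([], [])).1

-- ===== PORT B =====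
-- loop body of B: best updated from each window (a, b, c); a * 3 is [a, a, a]
def stepB_largestGoodInteger (best : List Char) (w : Char × Char × Char) : List Char :=
  if w.1 = w.2.1 ∧ w.2.1 = w.2.2 ∧ best < [w.1, w.1, w.1] then [w.1, w.1, w.1] else best

def largestGoodInteger_alt (num : String) : String :=
  -- zip(num, num[1:], num[2:]) as a nested zip: num[1:] is .tail, num[2:] is .tail.tail
  String.ofList (List.foldl stepB_largestGoodInteger []
    (num.toList.zip (num.toList.tail.zip num.toList.tail.tail)))

-- ===== PRECONDITION & SPEC =====
def Spec_largestGoodInteger (num : String) (out : String) : Prop := out = largestGoodInteger_alt num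
instance (num : String) (out : String) : Decidable (Spec_largestGoodInteger num out) := by unfold Spec_largestGoodInteger; infer_instance

-- ===== CLAIM (what is proved, stated in full; the proofs are below) =====
def Claim_equal_largestGoodInteger : Prop := ∀ (num : String), Dom_largestGoodInteger num → Spec_largestGoodInteger num (largestGoodInteger num)

-- ===== LEMMAS AND PROOFS =====

-- maximum (under lexicographic order) of all equal-letter length-3 windows of a list, [] if none
def maxCand : List Char → List Char
  | a :: b :: c :: t => if a = b ∧ b = c then max [a, a, a] (maxCand (b :: c :: t)) else maxCand (b :: c :: t)
  | _ => []

theorem if_lt_eq_max (a b : List Char) : (if a < b then b else a) = max a b := by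
  rcases lt_trichotomy a b with h | h | h <;> simp [le_of_lt, h]

theorem max_nil_right (a : List Char) : max a [] = a := by
  have : ¬ a < ([] : List Char) := by simp
  rw [← if_lt_eq_max, if_neg this]

theorem max_nil_left (a : List Char) : max ([] : List Char) a = a := by
  rw [max_comm, max_nil_right]

-- a window whose first letter differs contributes nothing
theorem maxCand_cons_ne {c b : Char} (t : List Char) (h : c ≠ b) :
    maxCand (c :: b :: t) = maxCand (b :: t) := by
  cases t with
  | nil => simp [maxCand]
  | cons e t' => simp [maxCand, h]

-- one extra copy of c in front is absorbed by max [c,c,c]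
theorem maxCand_cons_absorb (t : List Char) (c : Char) :
    max [c, c, c] (maxCand (c :: t)) = max [c, c, c] (maxCand t) := by
  cases t with
  | nil => simp [maxCand]
  | cons b t' =>
    cases t' with
    | nil => simp [maxCand]
    | cons e t'' =>
      by_cases hb : c = b
      · subst hb
        by_cases he : c = e <;> simp [maxCand, he]
      · rw [maxCand_cons_ne _ hb]

-- two extra copies of c in front are absorbed by max [c,c,c]
theorem maxCand_cons_cons_absorb (t : List Char) (c : Char) :
    max [c, c, c] (maxCand (c :: c :: t)) = max [c, c, c] (maxCand t) := by
  induction t with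
  | nil => simp [maxCand]
  | cons e t' ih =>
    by_cases he : c = e
    · subst he
      have h1 : maxCand (c :: c :: c :: t') = max [c, c, c] (maxCand (c :: c :: t')) := by
        simp [maxCand]
      rw [h1, ← max_assoc, max_self, ih, maxCand_cons_absorb]
    · simp only [show maxCand (c :: c :: e :: t') = maxCand (c :: e :: t') by
        simp [maxCand, he], maxCand_cons_ne t' he]

-- B's fold computes max best (maxCand l)
theorem foldB_eq_maxCand (l : List Char) (best : List Char) :
    List.foldl stepB_largestGoodInteger best (l.zip (l.tail.zip l.tail.tail)) = max best (maxCand l) := by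
  induction l generalizing best with
  | nil => simp [maxCand, max_nil_right]
  | cons a ls ih =>
    cases ls with
    | nil => simp [maxCand, max_nil_right]
    | cons b t =>
      cases t with
      | nil => simp [maxCand, max_nil_right]
      | cons c t' =>
        have hz : (a :: b :: c :: t').zip ((b :: c :: t').zip (c :: t')) =
            (a, b, c) :: ((b :: c :: t').zip ((c :: t').zip t')) := by simp
        simp only [List.tail_cons] at *
        rw [hz, List.foldl_cons, ih]
        have hstep : stepB_largestGoodInteger best (a, b, c) =
            max best (if a = b ∧ b = c then [a, a, a] else []) := by
          by_cases h : a = b ∧ b = c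
          · simp only [stepB_largestGoodInteger, h.1, h.2, and_self, true_and, if_pos]
            rw [if_lt_eq_max]
          · rw [show stepB_largestGoodInteger best (a, b, c) = best from
                if_neg (by tauto)]
            simp [h, max_nil_right]
        rw [hstep, max_assoc]
        congr 1
        by_cases h : a = b ∧ b = c
        · simp [maxCand, h]
        · simp [maxCand, h, max_nil_left]

-- A's fold, from a partial run of at most two equal letters, computes max ret (maxCand (run ++ rest))
theorem foldA_eq_maxCand (l : List Char) (ret : List Char) (c : Char) (m : Nat) (hm : m ≤ 2) :
    (List.foldl stepA_largestGoodInteger (ret, List.replicate m c) l).1 =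
      max ret (maxCand (List.replicate m c ++ l)) := by
  induction l generalizing ret c m with
  | nil =>
    interval_cases m <;> simp [maxCand, max_nil_right]
  | cons d t ih =>
    interval_cases m
    · -- cur = ""
      simpa [stepA_largestGoodInteger] using ih ret d 1 (by omega)
    · -- cur = [c]
      by_cases h : c = d
      · subst h
        have := ih ret c 2 (by omega)
        simpa [stepA_largestGoodInteger, PySem.List.pyGet?_neg_one] using this
      · have := ih ret d 1 (by omega)
        simp only [List.replicate_one] at this ⊢
        rw [show ([c] : List Char) ++ d :: t = c :: d :: t by rfl, maxCand_cons_ne _ h]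
        simpa [stepA_largestGoodInteger, PySem.List.pyGet?_neg_one, h] using this
    · -- cur = [c, c]
      by_cases h : c = d
      · subst h
        have hrep : (List.replicate 2 c : List Char) = [c, c] := by rfl
        have hstep : stepA_largestGoodInteger (ret, List.replicate 2 c) c =
            (max ret [c, c, c], []) := by
          rw [hrep]
          simp only [stepA_largestGoodInteger, PySem.List.pyGet?_neg_one]
          by_cases hr : ret < [c, c, c]
          · simp [hr, max_eq_right hr.le]
          · simp [hr, max_eq_left (not_lt.mp hr)]
        rw [List.foldl_cons, hstep]
        have := ih (max ret [c, c, c]) c 0 (by omega)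
        simp only [List.replicate_zero, List.nil_append] at this
        rw [this, hrep]
        have h3 : maxCand ([c, c] ++ c :: t) = max [c, c, c] (maxCand t) := by
          show maxCand (c :: c :: c :: t) = _
          rw [show maxCand (c :: c :: c :: t) = max [c, c, c] (maxCand (c :: c :: t)) by
            simp [maxCand], maxCand_cons_cons_absorb]
        rw [h3, max_assoc]
      · have := ih ret d 1 (by omega)
        have h3 : maxCand (List.replicate 2 c ++ d :: t) = maxCand (d :: t) := by
          show maxCand (c :: c :: d :: t) = _
          rw [show maxCand (c :: c :: d :: t) = maxCand (c :: d :: t) by simp [maxCand, h],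
              maxCand_cons_ne _ h]
        rw [h3]
        simpa [stepA_largestGoodInteger, PySem.List.pyGet?_neg_one, h] using this

-- ===== VERDICT (by name: the statement is the Claim_ definition above) =====
theorem largestGoodInteger_spec : Claim_equal_largestGoodInteger := by
  intro num _
  unfold Spec_largestGoodInteger largestGoodInteger largestGoodInteger_alt
  have hA := foldA_eq_maxCand num.toList [] 'a' 0 (by omega)
  simp only [List.replicate_zero, List.nil_append] at hA
  rw [hA, foldB_eq_maxCand, max_nil_left]
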